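-- pv_equiv track=rewrite | github.com/zchen15/pseudoknot_scanner | PseudoKnotScanner.py | GenerateBlockDynamic
-- ===== SOURCE A (Python) =====
-- def getSeq(index,N,Seq):
-- 	out=['_']*N
-- 	maxN=len(Seq)
-- 	for i in range(0,N):
-- 		# If block size runs over sequence length, then return what is leftover
-- 		if (index+i > maxN-1):
-- 			return "".join(out)
-- 		out[i]=Seq[index+i]
-- 	return "".join(out)
--
-- def GenerateBlockDynamic(y,Seq):
-- 	start=0
-- 	end=0
-- 	out=[]
-- 	for i in range(0,len(y)):
-- 		size=y[i]-start
-- 		block=getSeq(start,size,Seq)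
-- 		out.append(block)
-- 		start=y[i]
-- 	size=len(Seq)-start
-- 	block=getSeq(start,size,Seq)
-- 	out.append(block)
-- 	return out
-- ===== SOURCE B (Python) =====
-- def GenerateBlockDynamic(y, Seq):
--     bounds = [0, *y, len(Seq)]
--     out = []
--     for a, b in zip(bounds, bounds[1:]):
--         block = list(Seq[a:b])
--         block += ['_'] * (max(b - a, 0) - len(block))
--         out.append(''.join(block))
--     return out
-- ===== Notes on version B (the rewrite author's own statement) =====
-- stated objective: simpler
-- what changed: Replaced the per-character getSeq index loop with a bounds list ([0]+y+[len(Seq)]) and one slice-then-pad step per consecutive pair of bounds.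
-- intended difference: On y containing a negative position (still >= -len(Seq), otherwise A raises IndexError), A's element indexing wraps around to the end of Seq (e.g. A([-1],'ab') = ['', 'bab']) while B uses Python slice semantics (B([-1],'ab') = ['a', 'b__']); slice semantics is the intended reading of splitting a sequence at a position counted from the end. — e.g. on GenerateBlockDynamic([-1], "ab"): A returns ["", "bab"], B returns ["a", "b__"]
import Mathlib
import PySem

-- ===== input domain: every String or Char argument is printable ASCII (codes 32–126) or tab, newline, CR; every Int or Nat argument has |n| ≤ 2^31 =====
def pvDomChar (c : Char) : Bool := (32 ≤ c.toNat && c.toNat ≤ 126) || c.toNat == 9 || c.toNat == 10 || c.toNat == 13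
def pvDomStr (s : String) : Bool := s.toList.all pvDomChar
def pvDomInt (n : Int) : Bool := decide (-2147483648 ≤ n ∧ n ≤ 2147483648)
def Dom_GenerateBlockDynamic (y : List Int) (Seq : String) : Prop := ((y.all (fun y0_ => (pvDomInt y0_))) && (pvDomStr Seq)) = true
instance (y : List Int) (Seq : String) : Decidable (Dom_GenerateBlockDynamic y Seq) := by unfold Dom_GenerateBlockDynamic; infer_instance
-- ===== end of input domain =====

-- B replaces the per-character getSeq index loop with a bounds list and one slice-and-pad
-- expression per pair of consecutive bounds (objective: simpler).

-- ===== PORT A =====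
-- getSeq's 'for i in range(0,N)' loop: fuel counts the remaining iterations, i is the
-- Python loop variable, out the mutated list.  PySem.List.pyGet? is Seq[index+i]
-- (negative index wraps; none = IndexError, excluded by Pre_, out returned arbitrarily).
def getSeqGo (index : Int) (Seq : List Char) : Nat → Nat → List Char → List Char
  | 0, _, out => out
  | fuel + 1, i, out =>
    if index + (i : Int) > (Seq.length : Int) - 1 then out
    else
      match PySem.List.pyGet? Seq (index + (i : Int)) with
      | none => out      -- Python raises IndexError here (outside Pre_)
      | some c => getSeqGo index Seq fuel (i + 1) (out.set i c)

-- getSeq(index, N, Seq): out = ['_']*N, then the loop, then "".join(out)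
def getSeqA (index N : Int) (Seq : List Char) : List Char :=
  getSeqGo index Seq N.toNat 0 (List.replicate N.toNat '_')

-- the main loop of A: start is the running boundary; after the loop one more block
-- (up to len(Seq)) is appended
def goA (Seq : List Char) (start : Int) : List Int → List (List Char)
  | [] => [getSeqA start ((Seq.length : Int) - start) Seq]
  | v :: rest => getSeqA start (v - start) Seq :: goA Seq v rest

def GenerateBlockDynamic (y : List Int) (Seq : String) : List String :=
  (goA Seq.toList 0 y).map String.ofList

-- ===== PORT B =====
-- one block: list(Seq[a:b]) extended with ['_'] to width max(b-a,0), then joined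
-- (list(...)/join are str↔char-list conversions; here both sides are List Char already)
def blockB (Seq : List Char) (a b : Int) : List Char :=
  PySem.List.slice Seq (some a) (some b)
    ++ List.replicate ((max (b - a) 0).toNat - (PySem.List.slice Seq (some a) (some b)).length) '_'

def GenerateBlockDynamic_alt (y : List Int) (Seq : String) : List String :=
  let cs := Seq.toList
  let bounds : List Int := 0 :: (y ++ [(cs.length : Int)])
  (bounds.zip bounds.tail).map (fun p => String.ofList (blockB cs p.1 p.2))

-- ===== PRECONDITION & SPEC =====
-- Pre_ excludes exactly the inputs on which A raises IndexError: a boundary below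
-- -len(Seq) makes getSeq read Seq at an index below -len(Seq).
def Pre_GenerateBlockDynamic (y : List Int) (Seq : String) : Prop :=
  ∀ v ∈ y, -(Seq.toList.length : Int) ≤ v

instance (y : List Int) (Seq : String) : Decidable (Pre_GenerateBlockDynamic y Seq) := by
  unfold Pre_GenerateBlockDynamic; infer_instance

def pvWitness_GenerateBlockDynamic : List Int × String := ([2, 5], "abcdefg")

-- On y containing a negative position (still ≥ -len(Seq), otherwise A raises), A's element
-- indexing wraps around to the end of Seq (A([-1],"ab") = ["", "bab"]) while B uses slice
-- semantics (["a", "b__"]); slice semantics is the intended reading of a split position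
-- counted from the end.
def D_GenerateBlockDynamic (y : List Int) (Seq : String) : Prop :=
  ∃ v ∈ y, v < 0

instance (y : List Int) (Seq : String) : Decidable (D_GenerateBlockDynamic y Seq) := by
  unfold D_GenerateBlockDynamic; infer_instance

def Spec_GenerateBlockDynamic (y : List Int) (Seq : String) (out : List String) : Prop :=
  ¬ D_GenerateBlockDynamic y Seq → out = GenerateBlockDynamic_alt y Seq

instance (y : List Int) (Seq : String) (out : List String) : Decidable (Spec_GenerateBlockDynamic y Seq out) := by
  unfold Spec_GenerateBlockDynamic; infer_instance

def pvDiffWitness_GenerateBlockDynamic : List Int × String := ([-1], "ab")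

def pvDiffWitnessOut_GenerateBlockDynamic : (List String) × (List String) :=
  (["", "bab"], ["a", "b__"])

-- ===== CLAIM (what is proved, stated in full; the proofs are below) =====
def Claim_unchanged_GenerateBlockDynamic : Prop := ∀ (y : List Int) (Seq : String), Dom_GenerateBlockDynamic y Seq → Pre_GenerateBlockDynamic y Seq → Spec_GenerateBlockDynamic y Seq (GenerateBlockDynamic y Seq)

def Claim_changed_GenerateBlockDynamic : Prop := Dom_GenerateBlockDynamic (pvDiffWitness_GenerateBlockDynamic.1) (pvDiffWitness_GenerateBlockDynamic.2) ∧ Pre_GenerateBlockDynamic (pvDiffWitness_GenerateBlockDynamic.1) (pvDiffWitness_GenerateBlockDynamic.2) ∧ D_GenerateBlockDynamic (pvDiffWitness_GenerateBlockDynamic.1) (pvDiffWitness_GenerateBlockDynamic.2) ∧ GenerateBlockDynamic (pvDiffWitness_GenerateBlockDynamic.1) (pvDiffWitness_GenerateBlockDynamic.2) = pvDiffWitnessOut_GenerateBlockDynamic.1 ∧ GenerateBlockDynamic_alt (pvDiffWitness_GenerateBlockDynamic.1) (pvDiffWitness_GenerateBlockDynamic.2) = pvDiffWitnessOut_GenerateBlockDynamic.2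 ∧ pvDiffWitnessOut_GenerateBlockDynamic.1 ≠ pvDiffWitnessOut_GenerateBlockDynamic.2

-- ===== LEMMAS AND PROOFS =====

-- the padded window B builds from a nonnegative start: take n of l, underscores for the rest
def padTake (l : List Char) (n : Nat) : List Char :=
  l.take n ++ List.replicate (n - l.length) '_'

-- helper used by getSeqGo_spec: take (i+1) after set i
lemma takeSetSucc {α : Type} (out : List α) (i : Nat) (c : α) (h : i < out.length) :
    (out.set i c).take (i + 1) = out.take i ++ [c] := by
  rw [List.set_eq_take_append_cons_drop, if_pos h, List.take_append]
  have hl : (out.take i).length = i := by simp; omega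
  rw [List.take_take, hl]
  simp

lemma getSeqGo_spec (index : Int) (Seq : List Char) (hidx : 0 ≤ index) :
    ∀ (fuel i : Nat) (out : List Char), out.length = i + fuel →
      out.drop i = List.replicate fuel '_' →
      getSeqGo index Seq fuel i out = out.take i ++ padTake (Seq.drop (index.toNat + i)) fuel := by
  intro fuel
  induction fuel with
  | zero =>
    intro i out hlen hdrop
    simp [getSeqGo, padTake]
    omega
  | succ f ih =>
    intro i out hlen hdrop
    rw [getSeqGo]
    by_cases hgt : index + (i : Int) > (Seq.length : Int) - 1
    · -- past the end: Seq.drop (index.toNat + i) = [], returns out unchanged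
      rw [if_pos hgt]
      have hdropnil : Seq.drop (index.toNat + i) = [] := by
        apply List.drop_eq_nil_of_le
        omega
      rw [hdropnil]
      simp only [padTake, List.take_nil, List.length_nil, Nat.sub_zero, List.nil_append]
      conv_lhs => rw [← List.take_append_drop i out]
      rw [hdrop]
    · rw [if_neg hgt]
      have hlt : index + (i : Int) < (Seq.length : Int) := by omega
      have hnn : 0 ≤ index + (i : Int) := by omega
      have hget : PySem.List.pyGet? Seq (index + (i : Int)) = some Seq[(index + (i : Int)).toNat] := by
        exact PySem.List.pyGet?_eq_some_getElem Seq hnn hlt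
      rw [hget]
      show getSeqGo index Seq f (i + 1) (out.set i Seq[(index + (i : Int)).toNat]) = _
      have hi : (index + (i : Int)).toNat = index.toNat + i := by omega
      have hlen' : (out.set i Seq[(index + (i : Int)).toNat]).length = (i + 1) + f := by
        simp [hlen]; omega
      have hsetdrop : (out.set i Seq[(index + (i : Int)).toNat]).drop (i + 1) = List.replicate f '_' := by
        rw [List.drop_set_of_lt (by omega : i < i + 1)]
        have h' : List.drop 1 (List.drop i out) = List.replicate f '_' := by
          rw [hdrop]; rfl
        rwa [List.drop_drop] at h'
      rw [ih (i + 1) _ hlen' hsetdrop]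
      -- both sides: take i out ++ (c :: padded tail)
      have hwin : Seq.drop (index.toNat + i) = Seq[index.toNat + i] :: Seq.drop (index.toNat + i + 1) := by
        rw [List.drop_eq_getElem_cons (by omega)]
      have htake : (out.set i Seq[(index + (i : Int)).toNat]).take (i + 1)
          = out.take i ++ [Seq[(index + (i : Int)).toNat]] := by
        exact takeSetSucc out i _ (by omega)
      have hc : Seq[(index + (i : Int)).toNat]'(by omega) = Seq[index.toNat + i]'(by omega) := by
        congr 1
      rw [htake, hwin, padTake, padTake]
      simp [hc, List.append_assoc, Nat.succ_sub_succ, Nat.add_assoc]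

lemma getSeqA_eq_padTake (index N : Int) (Seq : List Char) (hidx : 0 ≤ index) :
    getSeqA index N Seq = padTake (Seq.drop index.toNat) N.toNat := by
  unfold getSeqA
  rw [getSeqGo_spec index Seq hidx N.toNat 0 _ (by simp) (by simp)]
  simp

lemma blockB_eq_padTake (Seq : List Char) (a b : Int) (ha : 0 ≤ a) (hb : 0 ≤ b) :
    blockB Seq a b = padTake (Seq.drop a.toNat) (b - a).toNat := by
  unfold blockB padTake
  rw [PySem.List.slice_toNat Seq ha hb]
  have h1 : b.toNat - a.toNat = (b - a).toNat := by omega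
  have h2 : (max (b - a) 0).toNat = (b - a).toNat := by omega
  rw [h1, h2]
  have hc : (b - a).toNat - ((Seq.drop a.toNat).take (b - a).toNat).length
      = (b - a).toNat - (Seq.drop a.toNat).length := by
    simp [List.length_take]
    omega
  rw [hc]

lemma getSeqA_eq_blockB (Seq : List Char) (a b : Int) (ha : 0 ≤ a) (hb : 0 ≤ b) :
    getSeqA a (b - a) Seq = blockB Seq a b := by
  rw [getSeqA_eq_padTake _ _ _ ha, blockB_eq_padTake _ _ _ ha hb]

lemma goA_eq_zip (Seq : List Char) :
    ∀ (y : List Int) (start : Int), 0 ≤ start → (∀ v ∈ y, 0 ≤ v) →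
      goA Seq start y
        = ((start :: (y ++ [(Seq.length : Int)])).zip (y ++ [(Seq.length : Int)])).map
            (fun p => blockB Seq p.1 p.2) := by
  intro y
  induction y with
  | nil =>
    intro start hs _
    simp only [goA, List.nil_append, List.zip_cons_cons, List.zip_nil_right, List.map_cons,
      List.map_nil]
    rw [getSeqA_eq_blockB Seq start _ hs (by positivity)]
  | cons v rest ih =>
    intro start hs hall
    have hv : 0 ≤ v := hall v (List.mem_cons_self ..)
    simp only [goA, List.cons_append, List.zip_cons_cons, List.map_cons]
    rw [getSeqA_eq_blockB Seq start v hs hv, ih v hv (fun w hw => hall w (List.mem_cons_of_mem _ hw))]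

-- ===== VERDICT (by name: the statement is the Claim_ definition above) =====
theorem GenerateBlockDynamic_spec : Claim_unchanged_GenerateBlockDynamic := by
  intro y Seq _ _ hnd
  have hall : ∀ v ∈ y, 0 ≤ v := by
    intro v hv
    by_contra hneg
    exact hnd ⟨v, hv, by omega⟩
  unfold GenerateBlockDynamic GenerateBlockDynamic_alt
  rw [goA_eq_zip Seq.toList y 0 le_rfl hall]
  simp [List.map_map]

theorem GenerateBlockDynamic_changed : Claim_changed_GenerateBlockDynamic := by
  unfold Claim_changed_GenerateBlockDynamic; decide
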